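-- pv_equiv track=rewrite | github.com/PetrovitchSharp/mindbox-test-task | functions.py | get_members_count
-- ===== SOURCE A (Python) =====
-- def get_members_count(n_customers: int, n_first_id: int) -> dict:
--     '''
--     Get the number of members of each group
--
--     Args:
--         n_customers: Number of customers
--         n_first_id: First ID
--
--     Returns:
--         Dictionaty {Group number (sum of digits of ID) : Count of members}
--
--     Raises:
--         ValueError: If number of customers less than 1 OR first ID is negative
--     '''
--     def get_sum_fo_digits(num: int) -> int:
--         '''
--         Get sum of decimal number's digits
--
--         Args:
--             num: Decimal non-negative number
--
--         Returns:
--             Sum of number's digits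
--
--         Raises:
--             ValueError: If parameter less than 0
--         '''
--         if num < 0:
--             raise ValueError('Number has to be non-negative integer')
--
--         sum_ = 0
--
--         # At each iteration we get last digit,
--         # add it to the sum and divide number by 10
--         # to get next digit as long as we have digits
--         while num > 0:
--             sum_ += num % 10
--             num //= 10
--
--         return sum_
--
--     if n_customers < 1:
--         raise ValueError('Number of customers must be non-negative integer')
--
--     if n_first_id < 0:
--         raise ValueError('ID must be non-negative integer')
--
--     groups_counter = {}
--
--     # For each ID we get it's digit's sum
--     for num in range(n_first_id, n_first_id + n_customers):
--
--         sum_of_digits = get_sum_fo_digits(num)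
--
--         if groups_counter.get(sum_of_digits, 0) > 0:
--             # If we have such sum of digits in dictionary,
--             # we increase it's value
--             groups_counter[sum_of_digits] += 1
--         else:
--             # If we don't have such sum of digits in dictionary,
--             # we set it equal to 1
--             groups_counter[sum_of_digits] = 1
--
--     return groups_counter
-- ===== SOURCE B (Python) =====
-- def get_members_count(n_customers: int, n_first_id: int) -> dict:
--     '''Same groups count, but the digit sum is maintained incrementally across
--     consecutive IDs (ds(n+1) = ds(n) + 1 - 9*trailing_nines(n)) instead of being
--     recomputed digit by digit for every ID.'''
--     if n_customers < 1:
--         raise ValueError('Number of customers must be non-negative integer')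
--     if n_first_id < 0:
--         raise ValueError('ID must be non-negative integer')
--
--     # digit sum of the first ID only; every later one is derived incrementally
--     ds = 0
--     t = n_first_id
--     while t > 0:
--         ds += t % 10
--         t //= 10
--
--     counts = {}
--     num = n_first_id
--     last = n_first_id + n_customers
--     while num < last:
--         counts[ds] = counts.get(ds, 0) + 1
--         # digit sum of num + 1: +1, minus 9 for every trailing nine of num
--         ds += 1
--         t = num
--         while t % 10 == 9:
--             ds -= 9
--             t //= 10
--         num += 1
--     return counts
-- ===== Notes on version B (the rewrite author's own statement) =====
-- stated objective: faster
-- what changed: Instead of recomputing the digit sum of every ID with an inner divmod loop, B maintains a running digit sum across consecutive IDs (ds(n+1) = ds(n) + 1 - 9*trailing_nines(n)), doing amortized O(1) work per ID.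
import Mathlib
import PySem

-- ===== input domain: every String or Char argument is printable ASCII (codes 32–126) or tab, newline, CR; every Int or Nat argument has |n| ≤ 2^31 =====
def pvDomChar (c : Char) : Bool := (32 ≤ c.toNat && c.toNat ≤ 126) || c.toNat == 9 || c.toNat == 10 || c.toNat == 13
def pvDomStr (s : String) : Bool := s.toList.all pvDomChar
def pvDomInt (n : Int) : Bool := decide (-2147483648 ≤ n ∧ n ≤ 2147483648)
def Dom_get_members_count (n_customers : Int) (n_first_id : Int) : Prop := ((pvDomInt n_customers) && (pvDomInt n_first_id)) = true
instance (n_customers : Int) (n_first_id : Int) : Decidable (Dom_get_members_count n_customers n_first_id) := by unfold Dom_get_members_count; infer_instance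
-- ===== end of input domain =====

-- B replaces A's per-ID digit-decomposition loop by an incrementally maintained digit sum
-- (ds(n+1) = ds(n) + 1 - 9·trailing_nines(n)), amortized O(1) per ID instead of O(digits).

-- ===== PORT A =====
-- A's inner helper get_sum_fo_digits: 'while num > 0: sum_ += num % 10; num //= 10'.
-- Under Pre_ every num fed to it is ≥ 0, so Python's % и // agree with Nat's; we run the
-- loop on num.toNat (exact for num ≥ 0; num < 0 raises in Python and lies outside Pre_).
def pvSumDigitsA (n : Nat) : Nat :=
  if n = 0 then 0 else n % 10 + pvSumDigitsA (n / 10)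
decreasing_by exact Nat.div_lt_self (Nat.pos_of_ne_zero (by assumption)) (by omega)

def getSumFoDigits (num : Int) : Int := (pvSumDigitsA num.toNat : Int)

def get_members_count (n_customers : Int) (n_first_id : Int) : List (Int × Int) :=
  ((PySem.List.pyRange n_first_id (n_first_id + n_customers) 1).foldl
    (fun d num =>
      let s := getSumFoDigits num
      if d.getD s 0 > 0 then d.insert s (d.getD s 0 + 1) else d.insert s 1)
    PySem.Dict.empty).items

-- ===== PORT B =====
-- Source B's seed loop computing the digit sum of the first ID (run once).
def pvSeedSum (n : Nat) : Nat :=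
  if n = 0 then 0 else n % 10 + pvSeedSum (n / 10)
decreasing_by exact Nat.div_lt_self (Nat.pos_of_ne_zero (by assumption)) (by omega)

-- Source B's inner 'while t % 10 == 9: ds -= 9; t //= 10' (t = current id, always ≥ 0 under Pre_).
def pvCarry (ds : Int) (t : Nat) : Int :=
  if t % 10 = 9 then pvCarry (ds - 9) (t / 10) else ds
decreasing_by exact Nat.div_lt_self (by omega) (by omega)

-- Source B's main 'while num < last' loop: k remaining iterations, dict, running digit sum, current id.
def pvBLoop (k : Nat) (d : PySem.Dict Int Int) (ds : Int) (num : Nat) : PySem.Dict Int Int :=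
  match k with
  | 0 => d
  | k + 1 => pvBLoop k (d.insert ds (d.getD ds 0 + 1)) (pvCarry (ds + 1) num) (num + 1)

def get_members_count_alt (n_customers : Int) (n_first_id : Int) : List (Int × Int) :=
  (pvBLoop n_customers.toNat PySem.Dict.empty
    (pvSeedSum n_first_id.toNat : Int) n_first_id.toNat).items

-- ===== PRECONDITION & SPEC =====
-- Pre_ excludes exactly the inputs on which the Python A raises ValueError
-- (n_customers < 1 or n_first_id < 0); B raises the same ValueError there.
def Pre_get_members_count (n_customers : Int) (n_first_id : Int) : Prop :=
  1 ≤ n_customers ∧ 0 ≤ n_first_id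
instance (n_customers : Int) (n_first_id : Int) : Decidable (Pre_get_members_count n_customers n_first_id) := by unfold Pre_get_members_count; infer_instance

def pvWitness_get_members_count : Int × Int := (3, 8)

def Spec_get_members_count (n_customers : Int) (n_first_id : Int) (out : List (Int × Int)) : Prop := out = get_members_count_alt n_customers n_first_id
instance (n_customers : Int) (n_first_id : Int) (out : List (Int × Int)) : Decidable (Spec_get_members_count n_customers n_first_id out) := by unfold Spec_get_members_count; infer_instance

-- ===== CLAIM (what is proved, stated in full; the proofs are below) =====
def Claim_equal_get_members_count : Prop := ∀ (n_customers : Int) (n_first_id : Int), Dom_get_members_count n_customers n_first_id → Pre_get_members_count n_customers n_first_id → Spec_get_members_count n_customers n_first_id (get_members_count n_customers n_first_id)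

-- ===== LEMMAS AND PROOFS =====

theorem pvSeedSum_eq (n : Nat) : pvSeedSum n = pvSumDigitsA n := by
  induction n using Nat.strong_induction_on with
  | _ n ih =>
    rw [pvSeedSum, pvSumDigitsA]
    by_cases h : n = 0
    · simp [h]
    · simp only [h, if_false]
      rw [ih (n / 10) (Nat.div_lt_self (Nat.pos_of_ne_zero h) (by omega))]

theorem pvSumDigitsA_unfold (n : Nat) : pvSumDigitsA n = n % 10 + pvSumDigitsA (n / 10) := by
  rw [pvSumDigitsA]
  by_cases h : n = 0
  · simp [h, pvSumDigitsA]
  · simp [h]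

-- the carry loop turns the digit sum of m (plus one) into the digit sum of m+1
theorem pvCarry_succ (m : Nat) :
    pvCarry ((pvSumDigitsA m : Int) + 1) m = (pvSumDigitsA (m + 1) : Int) := by
  induction m using Nat.strong_induction_on with
  | _ m ih =>
    rw [pvCarry]
    by_cases h9 : m % 10 = 9
    · have hm : 0 < m := by omega
      have h1 : (m + 1) % 10 = 0 := by omega
      have h2 : (m + 1) / 10 = m / 10 + 1 := by omega
      have hs : pvSumDigitsA m = 9 + pvSumDigitsA (m / 10) := by
        rw [pvSumDigitsA_unfold m, h9]
      have hs1 : pvSumDigitsA (m + 1) = pvSumDigitsA (m / 10 + 1) := by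
        rw [pvSumDigitsA_unfold (m + 1), h1, h2]; omega
      simp only [h9, if_true]
      have := ih (m / 10) (Nat.div_lt_self hm (by omega))
      rw [hs, hs1, ← this]
      have : ((9 + pvSumDigitsA (m / 10) : Nat) : Int) + 1 - 9 = (pvSumDigitsA (m / 10) : Int) + 1 := by
        push_cast; ring
      rw [this]
    · have h1 : (m + 1) % 10 = m % 10 + 1 := by omega
      have h2 : (m + 1) / 10 = m / 10 := by omega
      simp only [h9, if_false]
      rw [pvSumDigitsA_unfold (m + 1), h1, h2, pvSumDigitsA_unfold m]
      push_cast
      ring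

-- the dict values stay nonnegative through the loop
def pvNonneg (d : PySem.Dict Int Int) : Prop := ∀ s : Int, 0 ≤ d.getD s 0

theorem pvNonneg_insert {d : PySem.Dict Int Int} (h : pvNonneg d) (s : Int) :
    pvNonneg (d.insert s (d.getD s 0 + 1)) := by
  intro s'
  rw [PySem.Dict.getD_insert]
  split_ifs with hs
  · have := h s; omega
  · exact h s'

-- under nonnegativity, A's two-branch update is the unconditional bump
theorem pvStepA_eq {d : PySem.Dict Int Int} (h : pvNonneg d) (s : Int) :
    (if d.getD s 0 > 0 then d.insert s (d.getD s 0 + 1) else d.insert s 1) =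
      d.insert s (d.getD s 0 + 1) := by
  split_ifs with hp
  · rfl
  · have h0 := h s
    have : d.getD s 0 = 0 := by omega
    rw [this]; norm_num

-- A's fold over the id range equals B's loop, provided ds is the digit sum of the first id
theorem pvMain (k : Nat) : ∀ (m : Nat) (d : PySem.Dict Int Int), pvNonneg d →
    (PySem.List.pyRange (m : Int) ((m : Int) + (k : Int)) 1).foldl
      (fun d num =>
        let s := getSumFoDigits num
        if d.getD s 0 > 0 then d.insert s (d.getD s 0 + 1) else d.insert s 1) d
      = pvBLoop k d (pvSumDigitsA m : Int) m := by
  induction k with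
  | zero =>
    intro m d _
    rw [PySem.List.pyRange_one_eq_nil (by simp)]
    rfl
  | succ k ih =>
    intro m d hd
    rw [PySem.List.pyRange_one_cons (by push_cast; omega)]
    simp only [List.foldl_cons]
    have hsg : getSumFoDigits (m : Int) = (pvSumDigitsA m : Int) := by
      simp [getSumFoDigits]
    rw [pvBLoop]
    have hrange : (m : Int) + ((k + 1 : Nat) : Int) = ((m + 1 : Nat) : Int) + (k : Int) := by
      push_cast; ring
    simp only [hsg]
    have hcast : ((m : Int) + 1) = ((m + 1 : Nat) : Int) := by push_cast; ring
    rw [pvStepA_eq hd, hrange, hcast, ih (m + 1) _ (pvNonneg_insert hd _), pvCarry_succ]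

theorem pvNonneg_empty : pvNonneg PySem.Dict.empty := by
  intro s; simp [PySem.Dict.getD_empty]

-- ===== VERDICT (by name: the statement is the Claim_ definition above) =====
theorem get_members_count_spec : Claim_equal_get_members_count := by
  intro n f _ hpre
  unfold Spec_get_members_count get_members_count get_members_count_alt
  obtain ⟨hn, hf⟩ := hpre
  have hfe : f = ((f.toNat : Nat) : Int) := (Int.toNat_of_nonneg hf).symm
  have hne : n = ((n.toNat : Nat) : Int) := (Int.toNat_of_nonneg (by omega)).symm
  rw [pvSeedSum_eq]
  conv_lhs => rw [hfe, hne]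
  rw [pvMain n.toNat f.toNat PySem.Dict.empty pvNonneg_empty]
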